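-- pv_equiv track=rewrite | github.com/clckwrkbdgr/dotfiles | lib/clckwrkbdgr/text.py | to_braille
-- ===== SOURCE A (Python) =====
-- def to_braille(text):
-- 	def _convert(code):
-- 		bin_code = bin(code)[2:].zfill(6)[::-1]
-- 		return [[int(bin_code[j + i * 3]) for i in range(2)] for j in range(3)]
--
-- 	LETTERS_NUMBERS = list(map(_convert,
-- 										[1, 3, 9, 25, 17, 11, 27, 19, 10, 26,
-- 										5, 7, 13, 29, 21, 15, 31, 23, 14, 30,
-- 										37, 39, 62, 45, 61, 53, 47, 63, 55, 46, 26]))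
-- 	CAPITAL_FORMAT = _convert(32)
-- 	NUMBER_FORMAT = _convert(60)
-- 	PUNCTUATION = {",": _convert(2), "-": _convert(18), "?": _convert(38),
-- 						"!": _convert(22), ".": _convert(50), "_": _convert(36)}
-- 	WHITESPACE = _convert(0)
--
-- 	MAX_SYMBOLS = 10
-- 	DIGITS = dict(zip('1234567890', range(10)))
-- 	LETTERS = dict(zip('abcdefghijklmnopqrstuvwxyz', range(26)))
--
-- 	result = []
-- 	for c in text:
-- 		if c in DIGITS:
-- 			result.append(NUMBER_FORMAT)
-- 			result.append(LETTERS_NUMBERS[DIGITS[c]])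
-- 		elif c.lower() in LETTERS:
-- 			if c.isupper():
-- 				result.append(CAPITAL_FORMAT)
-- 			result.append(LETTERS_NUMBERS[LETTERS[c.lower()]])
-- 		elif c in PUNCTUATION:
-- 			result.append(PUNCTUATION[c])
-- 		elif c == ' ':
-- 			result.append(WHITESPACE)
-- 		else: # pragma: no cover
-- 			raise ValueError("Unknown char: {0}".format(c))
--
-- 	rows = [[]]
-- 	for c in result:
-- 		rows[-1].append(c)
-- 		if len(rows[-1]) >= MAX_SYMBOLS:
-- 			rows.append([])
-- 	if len(rows) > 1 and len(rows[-1]) < MAX_SYMBOLS: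
-- 		if rows[-1]:
-- 			rows[-1] += [WHITESPACE for i in range(MAX_SYMBOLS - len(rows[-1]))]
-- 		else:
-- 			rows = rows[:-1]
--
-- 	dots = []
-- 	for row in rows:
-- 		if dots:
-- 			dots.append([0 for i in range(len(dots[0]))])
-- 		row_dots = [[], [], []]
-- 		for c in row:
-- 			if row_dots[0]:
-- 				row_dots[0] += [0]
-- 				row_dots[1] += [0]
-- 				row_dots[2] += [0]
-- 			row_dots[0].extend(c[0])
-- 			row_dots[1].extend(c[1])
-- 			row_dots[2].extend(c[2])
-- 		dots.extend(row_dots)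
-- 	return tuple(tuple(row) for row in dots)
-- ===== SOURCE B (Python) =====
-- def to_braille(text):
-- 	LN = [1, 3, 9, 25, 17, 11, 27, 19, 10, 26,
-- 		5, 7, 13, 29, 21, 15, 31, 23, 14, 30,
-- 		37, 39, 62, 45, 61, 53, 47, 63, 55, 46, 26]
-- 	PUNCT = {",": 2, "-": 18, "?": 38, "!": 22, ".": 50, "_": 36}
-- 	DIGITS = '1234567890'
-- 	LETTERS = 'abcdefghijklmnopqrstuvwxyz'
--
-- 	def codes_of(c):
-- 		if c in DIGITS:
-- 			return [60, LN[DIGITS.index(c)]]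
-- 		if c.lower() in LETTERS:
-- 			prefix = [32] if c.isupper() else []
-- 			return prefix + [LN[LETTERS.index(c.lower())]]
-- 		if c in PUNCT:
-- 			return [PUNCT[c]]
-- 		if c == ' ':
-- 			return [0]
-- 		raise ValueError("Unknown char: {0}".format(c))
--
-- 	codes = [k for c in text for k in codes_of(c)]
-- 	n = len(codes)
-- 	if n < 10:
-- 		rowlen, nrows = n, 1
-- 	else:
-- 		rowlen, nrows = 10, -(-n // 10)
-- 		codes = codes + [0] * (nrows * 10 - n)
-- 	width = 3 * rowlen - 1 if rowlen else 0
--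
-- 	def dot(line, col):
-- 		# every 4th line is the blank separator between rows; within a cell
-- 		# column col, the separator column col%3 == 2 reads bit >= 6 of a
-- 		# 6-bit code and is therefore 0 automatically
-- 		if line % 4 == 3:
-- 			return 0
-- 		return (codes[(line // 4) * rowlen + col // 3] >> (line % 4 + 3 * (col % 3))) & 1
--
-- 	return tuple(tuple(dot(line, col) for col in range(width))
-- 			for line in range(4 * nrows - 1))
-- ===== Notes on version B (the rewrite author's own statement) =====
-- stated objective: alternative
-- what changed: B never builds 3x2 cell matrices, chunked rows or joined lists at all: it keeps each braille cell as a single 6-bit integer code, computes the padded code count and row geometry arithmetically, and produces the final matrix positionally - each dot (line, col) is computed by a closed-form index formula (codes[(line//4)*rowlen + col//3] >> (line%4 + 3*(col%3))) & 1, with blank separator lines and columns falling out of the modular arithmetic (bit 6 of a 6-bit code is 0) instead of being appended between blocks.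
import Mathlib
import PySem

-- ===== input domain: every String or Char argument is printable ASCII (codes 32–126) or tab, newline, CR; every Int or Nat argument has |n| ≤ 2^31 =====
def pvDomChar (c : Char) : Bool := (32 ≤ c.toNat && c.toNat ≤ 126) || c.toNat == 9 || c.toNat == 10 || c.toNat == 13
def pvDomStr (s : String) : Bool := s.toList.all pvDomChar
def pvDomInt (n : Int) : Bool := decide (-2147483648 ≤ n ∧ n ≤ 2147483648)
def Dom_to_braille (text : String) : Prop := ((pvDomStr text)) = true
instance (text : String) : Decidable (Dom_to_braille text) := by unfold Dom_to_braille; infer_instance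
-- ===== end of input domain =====

-- B keeps each braille cell as a single 6-bit integer code and builds the final matrix positionally
-- by an index formula (codes[(line//4)*rowlen + col//3] >> (line%4 + 3*(col%3))) & 1, instead of A's
-- cell matrices, row chunking and list joins (objective: alternative; same asymptotic cost).


-- shared constant tables (pure data, used by both ports)
def pvDigitChars : List Char := "1234567890".toList
def pvLetterChars : List Char := "abcdefghijklmnopqrstuvwxyz".toList
-- DIGITS = dict(zip('1234567890', range(10))) as an association list
def pvDigits : List (Char × Nat) := pvDigitChars.zipIdx
-- LETTERS = dict(zip('abcdefghijklmnopqrstuvwxyz', range(26)))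
def pvLetters : List (Char × Nat) := pvLetterChars.zipIdx
-- the LETTERS_NUMBERS / LN code table
def pvCodes : List Int :=
  [1, 3, 9, 25, 17, 11, 27, 19, 10, 26,
   5, 7, 13, 29, 21, 15, 31, 23, 14, 30,
   37, 39, 62, 45, 61, 53, 47, 63, 55, 46, 26]

-- ===== PORT A =====
-- _convert: bin(code)[2:].zfill(6)[::-1] lists the 6 little-endian bits of code (exact for the
-- constant codes 0 ≤ code < 64 it is applied to); bit k = code // 2^k % 2.
def pvConvA (code : Int) : List (List Int) :=
  let bits := (List.range 6).map (fun k => PySem.Int.mod (PySem.Int.floordiv code (2 ^ k)) 2)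
  (List.range 3).map (fun j => (List.range 2).map (fun i => bits.getD (j + i * 3) 0))

def pvLNA : List (List (List Int)) := pvCodes.map pvConvA
def pvPunctA : List (Char × List (List Int)) :=
  [(',', pvConvA 2), ('-', pvConvA 18), ('?', pvConvA 38),
   ('!', pvConvA 22), ('.', pvConvA 50), ('_', pvConvA 36)]

-- one iteration of A's `for c in text` loop (c.isupper() / c.lower() are exact on the ASCII letters
-- this branch is reached on); the final `raise ValueError` branch returns res unchanged — Pre_ excludes it
def pvStepCellA (res : List (List (List Int))) (c : Char) : List (List (List Int)) :=
  match pvDigits.lookup c with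
  | some i => (res ++ [pvConvA 60]) ++ [pvLNA.getD i []]
  | none =>
    match pvLetters.lookup c.toLower with
    | some i => (if 'A' ≤ c ∧ c ≤ 'Z' then res ++ [pvConvA 32] else res) ++ [pvLNA.getD i []]
    | none =>
      match pvPunctA.lookup c with
      | some p => res ++ [p]
      | none => if c = ' ' then res ++ [pvConvA 0] else res

-- one iteration of A's row-filling loop; rows[-1].append(c) modelled on the last element
def pvStepRowA (rows : List (List (List (List Int)))) (c : List (List Int)) :
    List (List (List (List Int))) :=
  let rows := rows.dropLast ++ [rows.getLastD [] ++ [c]]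
  if 10 ≤ (rows.getLastD []).length then rows ++ [[]] else rows

-- A's trailing-row fixup: pad a partial last row, drop an empty one (only when >1 row)
def pvFixRowsA (rows : List (List (List (List Int)))) : List (List (List (List Int))) :=
  if 1 < rows.length ∧ (rows.getLastD []).length < 10 then
    if rows.getLastD [] ≠ [] then
      rows.dropLast ++ [rows.getLastD [] ++ List.replicate (10 - (rows.getLastD []).length) (pvConvA 0)]
    else rows.dropLast
  else rows

-- inner loop of A's dots assembly (c[0], c[1], c[2]: each cell is a 3-list, so getD never defaults)
def pvStepDotCellA (rd : List Int × List Int × List Int) (c : List (List Int)) :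
    List Int × List Int × List Int :=
  let rd := if rd.1 ≠ [] then (rd.1 ++ [0], rd.2.1 ++ [0], rd.2.2 ++ [0]) else rd
  (rd.1 ++ c.getD 0 [], rd.2.1 ++ c.getD 1 [], rd.2.2 ++ c.getD 2 [])

-- outer loop of A's dots assembly
def pvStepDotsA (dots : List (List Int)) (row : List (List (List Int)))  : List (List Int) :=
  let dots := if dots ≠ [] then dots ++ [List.replicate (dots.headD []).length 0] else dots
  let rd := row.foldl pvStepDotCellA ([], [], [])
  dots ++ [rd.1, rd.2.1, rd.2.2]

def to_braille (text : String) : List (List Int) :=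
  (pvFixRowsA ((text.toList.foldl pvStepCellA []).foldl pvStepRowA [[]])).foldl pvStepDotsA []

-- ===== PORT B =====
-- B's PUNCT dict: character → 6-bit code
def pvPunctCodes : List (Char × Int) :=
  [(',', 2), ('-', 18), ('?', 38), ('!', 22), ('.', 50), ('_', 36)]

-- B's codes_of(c): the 6-bit cell codes one character contributes (str.index is List.idxOf,
-- exact in the branch where containment holds; the raise branch returns [] — Pre_ excludes it)
def pvCodesOf (c : Char) : List Int :=
  if pvDigitChars.contains c then
    [60, pvCodes.getD (pvDigitChars.idxOf c) 0]
  else if pvLetterChars.contains c.toLower then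
    (if 'A' ≤ c ∧ c ≤ 'Z' then [(32 : Int)] else []) ++
      [pvCodes.getD (pvLetterChars.idxOf c.toLower) 0]
  else
    match pvPunctCodes.lookup c with
    | some k => [k]
    | none => if c = ' ' then [(0 : Int)] else []

-- B's dot(line, col): the positional formula for one entry of the matrix
def pvDotB (codes : List Int) (rowlen : Nat) (line col : Nat) : Int :=
  if line % 4 == 3 then 0
  else PySem.Int.band ((codes.getD ((line / 4) * rowlen + col / 3) 0) >>> ((line % 4) + 3 * (col % 3))) 1

-- -(-n // 10) is the ceiling division (n + 9) / 10 for n ≥ 0 (n is a length)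
def to_braille_alt (text : String) : List (List Int) :=
  let codes := text.toList.flatMap pvCodesOf
  let n := codes.length
  let rowlen := if n < 10 then n else 10
  let nrows := if n < 10 then 1 else (n + 9) / 10
  let padded := if n < 10 then codes else codes ++ List.replicate (nrows * 10 - n) (0 : Int)
  let width := if rowlen = 0 then 0 else 3 * rowlen - 1
  (List.range (4 * nrows - 1)).map (fun line =>
    (List.range width).map (fun col => pvDotB padded rowlen line col))

-- ===== PRECONDITION & SPEC =====
-- Pre_ excludes exactly the characters on which A's final else branch raises ValueError
def pvAllowedChars : List Char :=
  "1234567890abcdefghijklmnopqrstuvwxyzABCDEFGHIJKLMNOPQRSTUVWXYZ,-?!._ ".toList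

def Pre_to_braille (text : String) : Prop :=
  text.toList.all (fun c => pvAllowedChars.contains c) = true
instance (text : String) : Decidable (Pre_to_braille text) := by unfold Pre_to_braille; infer_instance

def pvWitness_to_braille : String := "Abc 123!"

def Spec_to_braille (text : String) (out : List (List Int)) : Prop := out = to_braille_alt text
instance (text : String) (out : List (List Int)) : Decidable (Spec_to_braille text out) := by
  unfold Spec_to_braille; infer_instance

-- ===== CLAIM (what is proved, stated in full; the proofs are below) =====
def Claim_equal_to_braille : Prop :=
  ∀ (text : String), Dom_to_braille text → Pre_to_braille text → Spec_to_braille text (to_braille text)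

-- ===== LEMMAS AND PROOFS =====

-- every code either program ever handles (table entries, the markers 60/32, punctuation, padding 0)
def pvAllCodes : List Int := pvCodes ++ [60, 32, 0, 2, 18, 38, 22, 50, 36]

-- abbreviation for the bit formula used in the proofs
def pvBit (k : Int) (m : Nat) : Int := PySem.Int.band (k >>> m) 1

-- proof-side view of a dot-matrix block of one row of cells
def pvLine (row : List (List (List Int))) (r : Nat) : List Int :=
  row.foldl (fun line cell => (if line ≠ [] then line ++ [0] else line) ++ cell.getD r []) []

def pvBlock (row : List (List (List Int))) : List (List Int) :=
  [pvLine row 0, pvLine row 1, pvLine row 2]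

-- proof-side recursive chunker (rows of 10)
def pvChunk {α : Type} (cs : List α) : List (List α) :=
  if cs = [] then [] else cs.take 10 :: pvChunk (cs.drop 10)
termination_by cs.length
decreasing_by
  rename_i h
  have : cs.length ≠ 0 := by simpa [List.length_eq_zero_iff] using h
  simp [List.length_drop]; omega

-- proof-side view of A's row list
def pvRowsB (cells : List (List (List Int))) : List (List (List (List Int))) :=
  let rows := if pvChunk cells = [] then [[]] else pvChunk cells
  if 1 < rows.length ∧ (rows.getLastD []).length < 10 then
    rows.dropLast ++ [rows.getLastD [] ++ List.replicate (10 - (rows.getLastD []).length) (pvConvA 0)]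
  else rows

-- ---- stage 1: the per-character contributions agree ----

theorem pvZipIdx_lookup (l : List Char) (n : Nat) (c : Char) :
    (l.zipIdx n).lookup c = if c ∈ l then some (n + l.idxOf c) else none := by
  induction l generalizing n with
  | nil => simp
  | cons a l ih =>
    simp only [List.zipIdx_cons, List.lookup]
    by_cases h : c = a
    · subst h; simp [List.idxOf_cons_self]
    · have hb : (c == a) = false := by simp [h]
      rw [hb]; simp only [ih]
      by_cases hm : c ∈ l
      · simp [hm, h, List.idxOf_cons, beq_false_of_ne (Ne.symm h)]; omega
      · simp [hm, h]

theorem pvLookup_map_val {α β γ : Type} [BEq α] (f : β → γ) (l : List (α × β)) (c : α) :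
    ((l.map (fun p => (p.1, f p.2))).lookup c) = (l.lookup c).map f := by
  induction l with
  | nil => simp
  | cons p l ih =>
    simp only [List.map_cons, List.lookup]
    cases h : (c == p.1) <;> simp [ih]

theorem pvLNA_getD : ∀ i < 31, pvLNA.getD i [] = pvConvA (pvCodes.getD i 0) := by decide

theorem pvStepCellA_eq (res : List (List (List Int))) (c : Char) :
    pvStepCellA res c = res ++ (pvCodesOf c).map pvConvA := by
  unfold pvStepCellA pvCodesOf
  rw [show pvDigits = pvDigitChars.zipIdx from rfl, show pvLetters = pvLetterChars.zipIdx from rfl]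
  rw [pvZipIdx_lookup, pvZipIdx_lookup]
  by_cases hd : c ∈ pvDigitChars
  · have hi : pvDigitChars.idxOf c < 10 := by
      have := List.idxOf_lt_length_of_mem hd
      simpa [pvDigitChars] using this
    simp only [if_pos hd, List.contains_eq_mem, hd, decide_true, if_true, Nat.zero_add]
    rw [pvLNA_getD _ (by omega)]
    simp
  · simp only [if_neg hd, List.contains_eq_mem, hd, decide_false, Bool.false_eq_true, if_false]
    by_cases hl : c.toLower ∈ pvLetterChars
    · have hi : pvLetterChars.idxOf c.toLower < 26 := by
        have := List.idxOf_lt_length_of_mem hl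
        simpa [pvLetterChars] using this
      simp only [if_pos hl, hl, decide_true, if_true, Nat.zero_add]
      rw [pvLNA_getD _ (by omega)]
      split_ifs <;> simp
    · simp only [if_neg hl, hl, decide_false, Bool.false_eq_true, if_false]
      have hP : pvPunctA = pvPunctCodes.map (fun p => (p.1, pvConvA p.2)) := by decide
      rw [hP, pvLookup_map_val]
      cases hp : pvPunctCodes.lookup c with
      | some k => simp
      | none => split_ifs <;> simp

theorem pvCells_eq (l : List Char) :
    l.foldl pvStepCellA [] = (l.flatMap pvCodesOf).map pvConvA := by
  have hf : pvStepCellA = fun res c => res ++ (pvCodesOf c).map pvConvA :=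
    funext fun r => funext fun c => pvStepCellA_eq r c
  rw [hf]
  have := PySem.List.foldl_append_eq_flatMap (g := fun c => (pvCodesOf c).map pvConvA) (l := l) (acc := [])
  simpa [List.map_flatMap] using this

-- ---- stage 2: A's row-building loop equals chunk-then-pad ----

def pvG (cur : List (List (List Int))) : List (List (List Int)) → List (List (List (List Int)))
  | [] => [cur]
  | c :: cs => if 10 ≤ (cur ++ [c]).length then (cur ++ [c]) :: pvG [] cs else pvG (cur ++ [c]) cs

theorem pvFoldRowA_eq (cs : List (List (List Int))) :
    ∀ (acc : List (List (List (List Int)))) (cur : List (List (List Int))), cur.length < 10 →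
      List.foldl pvStepRowA (acc ++ [cur]) cs = acc ++ pvG cur cs := by
  induction cs with
  | nil => intro acc cur h; simp [pvG]
  | cons c cs ih =>
    intro acc cur h
    have hstep : pvStepRowA (acc ++ [cur]) c =
        if 10 ≤ (cur ++ [c]).length then (acc ++ [cur ++ [c]]) ++ [[]] else acc ++ [cur ++ [c]] := by
      unfold pvStepRowA
      simp
    simp only [List.foldl_cons, hstep]
    by_cases h10 : 10 ≤ (cur ++ [c]).length
    · rw [if_pos h10]
      rw [ih (acc ++ [cur ++ [c]]) [] (by simp)]
      simp only [pvG, if_pos h10]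
      simp
    · rw [if_neg h10]
      rw [ih acc (cur ++ [c]) (by simp only [List.length_append, List.length_cons, List.length_nil] at h10 ⊢; omega)]
      simp only [pvG, if_neg h10]

theorem pvG_split (cs : List (List (List Int))) :
    ∀ (cur : List (List (List Int))), cur.length < 10 →
      pvG cur cs = if cur.length + cs.length < 10 then [cur ++ cs]
        else (cur ++ cs.take (10 - cur.length)) :: pvG [] (cs.drop (10 - cur.length)) := by
  induction cs with
  | nil =>
    intro cur h
    rw [if_pos (by simpa using h)]
    simp [pvG]
  | cons c cs ih =>
    intro cur h
    by_cases h9 : cur.length = 9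
    · have h10 : 10 ≤ (cur ++ [c]).length := by simp [h9]
      simp only [pvG, if_pos h10]
      rw [if_neg (by simp only [List.length_cons]; omega)]
      have ht : 10 - cur.length = 1 := by omega
      simp [ht]
    · have h10 : ¬ 10 ≤ (cur ++ [c]).length := by
        simp only [List.length_append, List.length_cons, List.length_nil]; omega
      simp only [pvG, if_neg h10]
      rw [ih (cur ++ [c]) (by simp only [List.length_append, List.length_cons, List.length_nil] at h10 ⊢; omega)]
      have hm : 10 - cur.length = (9 - cur.length) + 1 := by omega
      have hm2 : 10 - (cur ++ [c]).length = 9 - cur.length := by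
        simp only [List.length_append, List.length_cons, List.length_nil]; omega
      by_cases hsm : cur.length + (c :: cs).length < 10
      · rw [if_pos (by simp only [List.length_append, List.length_cons, List.length_nil] at hsm ⊢; omega), if_pos hsm]
        simp
      · rw [if_neg (by simp only [List.length_append, List.length_cons, List.length_nil] at hsm ⊢; omega), if_neg hsm]
        rw [hm2, hm]
        simp [List.take_succ_cons, List.drop_succ_cons]

theorem pvChunk_ne_nil {α : Type} {cs : List α} (h : cs ≠ []) : pvChunk cs ≠ [] := by
  rw [pvChunk]
  simp [h]

theorem pvG_nil_eq (cs : List (List (List Int))) :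
    pvG [] cs = if (10 : Nat) ∣ cs.length then pvChunk cs ++ [[]] else pvChunk cs := by
  suffices h : ∀ n (cs : List (List (List Int))), cs.length ≤ n →
      pvG [] cs = if (10 : Nat) ∣ cs.length then pvChunk cs ++ [[]] else pvChunk cs from
    h cs.length cs le_rfl
  intro n
  induction n with
  | zero =>
    intro cs h
    have : cs = [] := by simpa [List.length_eq_zero_iff] using Nat.le_zero.mp h
    subst this
    simp [pvG, pvChunk]
  | succ n ih =>
    intro cs hlen
    rcases eq_or_ne cs [] with rfl | hne
    · simp [pvG, pvChunk]
    by_cases hsmall : cs.length < 10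
    · rw [pvG_split cs [] (by simp), if_pos (by simpa using hsmall)]
      have hnd : ¬ (10 : Nat) ∣ cs.length := by
        intro hd
        rcases hd with ⟨k, hk⟩
        have h0 : cs.length = 0 := by omega
        exact hne (List.length_eq_zero_iff.mp h0)
      rw [if_neg hnd, pvChunk, if_neg hne]
      have hdrop : cs.drop 10 = [] := List.drop_eq_nil_of_le (by omega)
      rw [hdrop, List.take_of_length_le (by omega)]
      simp [pvChunk]
    · rw [Nat.not_lt] at hsmall
      rw [pvG_split cs [] (by simp), if_neg (by simp only [List.length_nil, Nat.zero_add]; omega)]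
      simp only [List.length_nil, Nat.sub_zero, List.nil_append]
      have hcs : pvChunk cs = cs.take 10 :: pvChunk (cs.drop 10) := by
        rw [pvChunk, if_neg hne]
      rw [ih (cs.drop 10) (by simp only [List.length_drop]; omega), hcs]
      have hdd : (10 : Nat) ∣ cs.length ↔ (10 : Nat) ∣ (cs.drop 10).length := by
        rw [List.length_drop]
        constructor
        · intro hh; exact Nat.dvd_sub hh (dvd_refl 10)
        · intro hh
          have := Nat.dvd_add hh (dvd_refl 10)
          rwa [Nat.sub_add_cancel hsmall] at this
      by_cases hd : (10 : Nat) ∣ cs.length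
      · rw [if_pos (hdd.mp hd), if_pos hd]; simp
      · rw [if_neg (fun hh => hd (hdd.mpr hh)), if_neg hd]

theorem pvGetLastD_of_ne_nil {α : Type} {l : List α} (h : l ≠ []) (a b : α) :
    l.getLastD a = l.getLastD b := by
  cases l with
  | nil => exact absurd rfl h
  | cons x xs =>
    obtain ⟨y, hy⟩ := Option.isSome_iff_exists.mp (List.getLast?_isSome.mpr (List.cons_ne_nil x xs))
    simp [List.getLastD_eq_getLast?, hy]

theorem pvChunk_last_len_of_dvd {α : Type} (cs : List α) (hd : (10 : Nat) ∣ cs.length)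
    (h : cs ≠ []) : ((pvChunk cs).getLastD []).length = 10 := by
  suffices hs : ∀ n (cs : List α), cs.length ≤ n → (10 : Nat) ∣ cs.length →
      cs ≠ [] → ((pvChunk cs).getLastD []).length = 10 from hs cs.length cs le_rfl hd h
  intro n
  induction n with
  | zero =>
    intro cs hl _ hne
    exact absurd (List.length_eq_zero_iff.mp (Nat.le_zero.mp hl)) hne
  | succ n ih =>
    intro cs hl hd hne
    have h10 : 10 ≤ cs.length := by
      rcases hd with ⟨k, hk⟩
      have : cs.length ≠ 0 := fun h0 => hne (List.length_eq_zero_iff.mp h0)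
      omega
    rw [pvChunk, if_neg hne]
    rcases eq_or_ne (cs.drop 10) [] with hdrop | hdrop
    · have hlen10 : cs.length = 10 := by
        have := List.length_drop (l := cs) (i := 10)
        rw [hdrop] at this
        simp at this
        omega
      have hcnil : pvChunk ([] : List α) = [] := by rw [pvChunk]; simp
      rw [hdrop, hcnil]
      simp only [List.getLastD_cons, List.getLastD_nil, List.length_take]
      omega
    · have hch := pvChunk_ne_nil hdrop
      have : ((pvChunk (cs.drop 10)).getLastD (cs.take 10)) = (pvChunk (cs.drop 10)).getLastD [] :=
        pvGetLastD_of_ne_nil hch _ _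
      rw [List.getLastD_cons, this]
      exact ih (cs.drop 10) (by simp only [List.length_drop]; omega)
        (by rw [List.length_drop]; exact Nat.dvd_sub hd (dvd_refl 10)) hdrop

theorem pvChunk_last_ne_nil {α : Type} (cs : List α) (hd : ¬ (10 : Nat) ∣ cs.length) :
    (pvChunk cs).getLastD [] ≠ [] := by
  suffices hs : ∀ n (cs : List α), cs.length ≤ n → ¬ (10 : Nat) ∣ cs.length →
      (pvChunk cs).getLastD [] ≠ [] from hs cs.length cs le_rfl hd
  intro n
  induction n with
  | zero =>
    intro cs hl hnd
    have : cs = [] := List.length_eq_zero_iff.mp (Nat.le_zero.mp hl)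
    subst this
    simp at hnd
  | succ n ih =>
    intro cs hl hnd
    have hne : cs ≠ [] := by
      intro h0
      subst h0
      simp at hnd
    rw [pvChunk, if_neg hne]
    rcases eq_or_ne (cs.drop 10) [] with hdrop | hdrop
    · have hcnil : pvChunk ([] : List α) = [] := by rw [pvChunk]; simp
      rw [hdrop, hcnil]
      simp only [List.getLastD_cons, List.getLastD_nil]
      intro h0
      have := congrArg List.length h0
      simp only [List.length_take, List.length_nil] at this
      exact hne (List.length_eq_zero_iff.mp (by omega))
    · have hch := pvChunk_ne_nil hdrop
      rw [List.getLastD_cons, pvGetLastD_of_ne_nil hch _ ([] : List α)]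
      have hge : 10 ≤ cs.length := by
        by_contra hlt
        exact hdrop (List.drop_eq_nil_of_le (by omega))
      refine ih (cs.drop 10) (by simp [List.length_drop]; omega) ?_
      rw [List.length_drop]
      intro hh
      have := Nat.dvd_add hh (dvd_refl 10)
      rw [Nat.sub_add_cancel hge] at this
      exact hnd this

theorem pvRows_eq (cs : List (List (List Int))) :
    pvFixRowsA (List.foldl pvStepRowA [[]] cs) = pvRowsB cs := by
  have h1 : List.foldl pvStepRowA [[]] cs = pvG [] cs := by
    simpa using pvFoldRowA_eq cs [] [] (by simp)
  rw [h1, pvG_nil_eq]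
  unfold pvFixRowsA pvRowsB
  rcases eq_or_ne cs [] with rfl | hne
  · simp [pvChunk]
  have hch := pvChunk_ne_nil hne
  by_cases hd : (10 : Nat) ∣ cs.length
  · rw [if_pos hd]
    have hlast : (pvChunk cs ++ [[]] : List (List (List (List Int)))).getLastD [] = [] :=
      List.getLastD_concat ..
    have hlen : 1 < (pvChunk cs ++ [[]]).length := by
      cases hcc : pvChunk cs with
      | nil => exact absurd hcc hch
      | cons a l => simp
    rw [if_pos ⟨hlen, by rw [hlast]; simp⟩]
    rw [if_neg (by rw [hlast]; simp)]
    rw [List.dropLast_concat]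
    dsimp only
    rw [if_neg hch]
    rw [if_neg (by
      intro hcond
      rw [pvChunk_last_len_of_dvd cs hd hne] at hcond
      omega)]
  · rw [if_neg hd]
    dsimp only
    rw [if_neg hch]
    by_cases hcond : 1 < (pvChunk cs).length ∧ ((pvChunk cs).getLastD []).length < 10
    · rw [if_pos hcond, if_pos hcond, if_pos (pvChunk_last_ne_nil cs hd)]
    · rw [if_neg hcond, if_neg hcond]

-- ---- stage R: A's row list as chunks of the padded code list ----

theorem pvChunk_map {α β : Type} (f : α → β) (l : List α) :
    pvChunk (l.map f) = (pvChunk l).map (List.map f) := by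
  suffices hs : ∀ n (l : List α), l.length ≤ n →
      pvChunk (l.map f) = (pvChunk l).map (List.map f) from hs l.length l le_rfl
  intro n
  induction n with
  | zero =>
    intro l h
    have : l = [] := List.length_eq_zero_iff.mp (Nat.le_zero.mp h)
    subst this
    simp [pvChunk]
  | succ n ih =>
    intro l h
    rcases eq_or_ne l [] with rfl | hne
    · simp [pvChunk]
    have hL : pvChunk (l.map f) = (l.map f).take 10 :: pvChunk ((l.map f).drop 10) := by
      rw [pvChunk, if_neg (by simpa using hne)]
    have hR : pvChunk l = l.take 10 :: pvChunk (l.drop 10) := by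
      rw [pvChunk, if_neg hne]
    rw [hL, hR, ← List.map_take, ← List.map_drop, ih (l.drop 10) (by simp [List.length_drop]; omega)]
    simp

theorem pvChunk_last_mod {α : Type} (Q : List α) (h : Q.length % 10 ≠ 0) :
    ((pvChunk Q).getLastD []).length = Q.length % 10 := by
  suffices hs : ∀ n (Q : List α), Q.length ≤ n → Q.length % 10 ≠ 0 →
      ((pvChunk Q).getLastD []).length = Q.length % 10 from hs Q.length Q le_rfl h
  intro n
  induction n with
  | zero =>
    intro Q hl hm
    have : Q = [] := List.length_eq_zero_iff.mp (Nat.le_zero.mp hl)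
    subst this; simp at hm
  | succ n ih =>
    intro Q hl hm
    have hne : Q ≠ [] := by
      intro h0; subst h0; simp at hm
    rw [pvChunk, if_neg hne]
    rcases eq_or_ne (Q.drop 10) [] with hdrop | hdrop
    · have hsm : Q.length ≤ 10 := by
        have := List.length_drop (l := Q) (i := 10)
        rw [hdrop] at this; simp at this; omega
      have hcnil : pvChunk ([] : List α) = [] := by rw [pvChunk]; simp
      rw [hdrop, hcnil]
      simp only [List.getLastD_cons, List.getLastD_nil, List.length_take]
      omega
    · have hch := pvChunk_ne_nil hdrop
      rw [List.getLastD_cons, pvGetLastD_of_ne_nil hch _ ([] : List α)]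
      have hge : 10 ≤ Q.length := by
        by_contra hlt
        exact hdrop (List.drop_eq_nil_of_le (by omega))
      rw [ih (Q.drop 10) (by simp [List.length_drop]; omega)
        (by rw [List.length_drop]; omega)]
      rw [List.length_drop]
      omega

theorem pvChunk_append_small {α : Type} (Q e : List α)
    (h : Q.length % 10 ≠ 0) (he : e.length + Q.length % 10 ≤ 10) :
    pvChunk (Q ++ e) = (pvChunk Q).dropLast ++ [(pvChunk Q).getLastD [] ++ e] := by
  suffices hs : ∀ n (Q : List α), Q.length ≤ n → Q.length % 10 ≠ 0 → e.length + Q.length % 10 ≤ 10 →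
      pvChunk (Q ++ e) = (pvChunk Q).dropLast ++ [(pvChunk Q).getLastD [] ++ e] from
    hs Q.length Q le_rfl h he
  intro n
  induction n with
  | zero =>
    intro Q hl hm _
    have : Q = [] := List.length_eq_zero_iff.mp (Nat.le_zero.mp hl)
    subst this; simp at hm
  | succ n ih =>
    intro Q hl hm he
    have hne : Q ≠ [] := by intro h0; subst h0; simp at hm
    by_cases hsm : Q.length < 10
    · have hQ : pvChunk Q = [Q] := by
        rw [pvChunk, if_neg hne, List.take_of_length_le (by omega),
          List.drop_eq_nil_of_le (by omega)]
        rw [pvChunk]; simp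
      have hQe : pvChunk (Q ++ e) = [Q ++ e] := by
        have hne2 : Q ++ e ≠ [] := by simp [hne]
        rw [pvChunk, if_neg hne2, List.take_of_length_le (by simp; omega),
          List.drop_eq_nil_of_le (by simp; omega)]
        rw [pvChunk]; simp
      rw [hQ, hQe]; simp
    · push_neg at hsm
      have hdne : Q.drop 10 ≠ [] := by
        intro h0
        have := List.length_drop (l := Q) (i := 10)
        rw [h0] at this; simp at this
        omega
      have hch := pvChunk_ne_nil hdne
      have hQex : pvChunk (Q ++ e) = (Q ++ e).take 10 :: pvChunk ((Q ++ e).drop 10) := by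
        rw [pvChunk, if_neg (by simp [hne])]
      have hQx : pvChunk Q = Q.take 10 :: pvChunk (Q.drop 10) := by
        rw [pvChunk, if_neg hne]
      rw [hQex, hQx]
      rw [List.take_append_of_le_length (by omega), List.drop_append_of_le_length (by omega)]
      rw [ih (Q.drop 10) (by simp [List.length_drop]; omega)
        (by rw [List.length_drop]; omega) (by rw [List.length_drop]; omega)]
      rw [List.dropLast_cons_of_ne_nil hch, List.getLastD_cons,
        pvGetLastD_of_ne_nil hch _ ([] : List α)]
      have hlast := pvGetLastD_of_ne_nil hch ([] : List α) (Q.take 10)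
      simp only [List.getLastD_eq_getLast?] at hlast
      simp [hlast]

theorem pvRowsB_nil : pvRowsB [] = [[]] := by
  have h : pvChunk ([] : List (List (List Int))) = [] := by rw [pvChunk]; simp
  unfold pvRowsB
  rw [h]
  simp

theorem pvRows_small (P0 : List Int) (h0 : P0 ≠ []) (h : P0.length < 10) :
    pvRowsB (P0.map pvConvA) = [P0.map pvConvA] := by
  have hone : pvChunk (P0.map pvConvA) = [P0.map pvConvA] := by
    rw [pvChunk, if_neg (by simpa using h0), List.take_of_length_le (by simp; omega),
      List.drop_eq_nil_of_le (by simp; omega)]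
    rw [pvChunk]; simp
  unfold pvRowsB
  rw [hone]
  simp

theorem pvMapLast (l : List (List Int)) :
    ((l.map (List.map pvConvA)).getLastD []) = List.map pvConvA (l.getLastD []) := by
  cases l with
  | nil => simp
  | cons a t =>
    rw [List.map_cons, List.getLastD_cons, List.getLastD_cons, List.getLastD_eq_getLast?,
      List.getLastD_eq_getLast?, List.getLast?_map]
    cases hll : t.getLast? with
    | none =>
      have : t = [] := by
        cases t with
        | nil => rfl
        | cons x xs => simp [List.getLast?_isSome] at hll
      subst this; simp
    | some y => simp [hll]

theorem pvRows_codes (P0 : List Int) (h : 10 ≤ P0.length) :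
    pvRowsB (P0.map pvConvA) =
      (pvChunk (P0 ++ List.replicate ((P0.length + 9) / 10 * 10 - P0.length) (0 : Int))).map
        (List.map pvConvA) := by
  have hne : P0 ≠ [] := by intro h0; subst h0; simp at h
  have hch := pvChunk_ne_nil (cs := P0) hne
  unfold pvRowsB
  rw [pvChunk_map]
  have hchm : ((pvChunk P0).map (List.map pvConvA)) ≠ [] := by simpa using hch
  rw [if_neg hchm]
  by_cases hd : P0.length % 10 = 0
  · have hpad : (P0.length + 9) / 10 * 10 - P0.length = 0 := by omega
    rw [hpad]
    simp only [List.replicate_zero, List.append_nil]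
    rw [if_neg (by
      intro hcond
      have h2 := hcond.2
      rw [pvMapLast, List.length_map,
        pvChunk_last_len_of_dvd P0 (Nat.dvd_of_mod_eq_zero hd) hne] at h2
      omega)]
  · have hpad : (P0.length + 9) / 10 * 10 - P0.length = 10 - P0.length % 10 := by omega
    rw [hpad]
    rw [pvChunk_append_small P0 _ hd (by simp only [List.length_replicate]; omega)]
    have hdne : P0.drop 10 ≠ [] := by
      intro h0
      have := List.length_drop (l := P0) (i := 10)
      rw [h0] at this; simp at this
      have h10 : P0.length = 10 := by omega
      rw [h10] at hd; simp at hd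
    have hlen2 : 1 < (pvChunk P0).length := by
      rw [pvChunk, if_neg hne]
      cases hcc : pvChunk (P0.drop 10) with
      | nil => exact absurd hcc (pvChunk_ne_nil hdne)
      | cons a l => simp
    have hml : ((pvChunk P0).getLastD []).length = P0.length % 10 := pvChunk_last_mod P0 hd
    rw [if_pos (by
      constructor
      · simpa using hlen2
      · rw [pvMapLast, List.length_map, hml]; omega)]
    rw [pvMapLast, List.length_map, hml]
    rw [List.map_append, List.map_cons, List.map_nil, List.map_append, List.map_replicate]
    rw [List.map_dropLast]

-- ---- stage 3: good codes and cell shape ----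

theorem pvCodes_getD_good : ∀ i : Nat, pvCodes.getD i 0 ∈ pvAllCodes := by
  intro i
  by_cases h : i < 31
  · revert h
    revert i
    decide
  · rw [List.getD_eq_default]
    · decide
    · simp [pvCodes]; omega

theorem pvPunct_lookup_good (c : Char) (q : Int) (hp : pvPunctCodes.lookup c = some q) :
    q ∈ pvAllCodes := by
  revert hp
  unfold pvPunctCodes
  simp only [List.lookup]
  repeat' split
  all_goals intro hp <;> simp_all <;> subst hp <;> decide

theorem pvCodesOf_good (c : Char) : ∀ k ∈ pvCodesOf c, k ∈ pvAllCodes := by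
  intro k hk
  unfold pvCodesOf at hk
  by_cases h1 : pvDigitChars.contains c = true
  · rw [if_pos h1] at hk
    simp only [List.mem_cons, List.not_mem_nil, or_false] at hk
    rcases hk with rfl | rfl
    · decide
    · exact pvCodes_getD_good _
  · rw [if_neg h1] at hk
    by_cases h2 : pvLetterChars.contains c.toLower = true
    · rw [if_pos h2] at hk
      rcases List.mem_append.mp hk with hh | hh
      · by_cases h3 : 'A' ≤ c ∧ c ≤ 'Z'
        · rw [if_pos h3] at hh
          simp only [List.mem_cons, List.not_mem_nil, or_false] at hh
          subst hh; decide
        · rw [if_neg h3] at hh; simp at hh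
      · simp only [List.mem_cons, List.not_mem_nil, or_false] at hh
        subst hh; exact pvCodes_getD_good _
    · rw [if_neg h2] at hk
      split at hk
      · rename_i q hp
        simp only [List.mem_cons, List.not_mem_nil, or_false] at hk
        subst hk
        exact pvPunct_lookup_good c _ hp
      · by_cases h4 : c = ' '
        · rw [if_pos h4] at hk
          simp only [List.mem_cons, List.not_mem_nil, or_false] at hk
          subst hk; decide
        · rw [if_neg h4] at hk; simp at hk

-- the 3×2 shape of every converted cell
def pvOkCell (c : List (List Int)) : Prop :=
  c.getD 0 [] ≠ [] ∧ c.getD 1 [] ≠ [] ∧ c.getD 2 [] ≠ []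

theorem pvOk_conv (k : Int) : pvOkCell (pvConvA k) := by
  unfold pvConvA pvOkCell
  refine ⟨?_, ?_, ?_⟩ <;> simp [List.range_succ]

-- bit-level content of a converted cell, for each code either program handles
theorem pvCell_bits : ∀ k ∈ pvAllCodes, ∀ j < 3,
    (pvConvA k).getD j [] = [pvBit k j, pvBit k (j + 3)] ∧ pvBit k (j + 6) = 0 := by decide

-- ---- stage 4: one row's dot lines, positionally ----

theorem pvFoldJoin (j : Nat) (cs : List (List (List Int))) :
    ∀ acc : List Int, acc ≠ [] →
      List.foldl (fun line cell => (if line ≠ [] then line ++ [0] else line) ++ cell.getD j []) acc cs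
        = acc ++ cs.flatMap (fun cell => 0 :: cell.getD j []) := by
  induction cs with
  | nil => intro acc _; simp
  | cons c cs ih =>
    intro acc hacc
    simp only [List.foldl_cons]
    rw [if_pos hacc, ih (acc ++ [0] ++ c.getD j []) (by simp)]
    simp [List.flatMap_cons]

theorem pvPos_flat (j : Nat) (hj : j < 3) : ∀ (P : List Int) (k : Int), k ∈ pvAllCodes →
    (∀ x ∈ P, x ∈ pvAllCodes) →
    (List.range (3 * (k :: P).length - 1)).map
        (fun col => pvBit ((k :: P).getD (col / 3) 0) (j + 3 * (col % 3)))
      = [pvBit k j, pvBit k (j + 3)] ++ P.flatMap (fun k' => [0, pvBit k' j, pvBit k' (j + 3)]) := by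
  intro P
  induction P with
  | nil =>
    intro k hk _
    have h2 : 3 * ([k] : List Int).length - 1 = 2 := by simp
    rw [h2]
    have hr : List.range 2 = [0, 1] := by decide
    rw [hr]
    simp
  | cons k' P ih =>
    intro k hk hg
    have hlen : 3 * (k :: k' :: P).length - 1 = 3 + (3 * (k' :: P).length - 1) := by
      simp only [List.length_cons]; omega
    rw [hlen, List.range_add, List.map_append, List.map_map]
    have hfirst : (List.range 3).map
        (fun col => pvBit ((k :: k' :: P).getD (col / 3) 0) (j + 3 * (col % 3)))
        = [pvBit k j, pvBit k (j + 3), 0] := by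
      have hr : List.range 3 = [0, 1, 2] := by decide
      rw [hr]
      simp only [List.map_cons, List.map_nil]
      norm_num
      exact (pvCell_bits k hk j hj).2
    rw [hfirst]
    have htail : ((List.range (3 * (k' :: P).length - 1)).map
        ((fun col => pvBit ((k :: k' :: P).getD (col / 3) 0) (j + 3 * (col % 3))) ∘ (3 + ·)))
        = (List.range (3 * (k' :: P).length - 1)).map
          (fun col => pvBit ((k' :: P).getD (col / 3) 0) (j + 3 * (col % 3))) := by
      apply List.map_congr_left
      intro col _
      simp only [Function.comp_apply]
      have hd : (3 + col) / 3 = col / 3 + 1 := by omega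
      have hm : (3 + col) % 3 = col % 3 := by omega
      rw [hd, hm, List.getD_cons_succ]
    rw [htail, ih k' (hg k' (by simp)) (fun x hx => hg x (by simp [hx]))]
    simp

theorem pvLine_pos (P : List Int) (j : Nat) (hj : j < 3)
    (hg : ∀ k ∈ P, k ∈ pvAllCodes) (hne : P ≠ []) :
    pvLine (P.map pvConvA) j =
      (List.range (3 * P.length - 1)).map
        (fun col => pvBit (P.getD (col / 3) 0) (j + 3 * (col % 3))) := by
  cases P with
  | nil => exact absurd rfl hne
  | cons k P =>
    have hk : k ∈ pvAllCodes := hg k (by simp)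
    have hgP : ∀ x ∈ P, x ∈ pvAllCodes := fun x hx => hg x (by simp [hx])
    unfold pvLine
    simp only [List.map_cons, List.foldl_cons]
    rw [if_neg (by simp)]
    rw [List.nil_append, pvFoldJoin j (P.map pvConvA) _ (by
      rw [(pvCell_bits k hk j hj).1]; simp)]
    rw [(pvCell_bits k hk j hj).1]
    rw [pvPos_flat j hj P k hk hgP]
    congr 1
    rw [List.flatMap_map]
    apply List.flatMap_congr
    intro k' hk'
    rw [(pvCell_bits k' (hgP k' hk') j hj).1]

theorem pvLine_len (P : List Int) (hg : ∀ k ∈ P, k ∈ pvAllCodes) (hne : P ≠ []) :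
    (pvLine (P.map pvConvA) 0).length = 3 * P.length - 1 := by
  rw [pvLine_pos P 0 (by omega) hg hne]
  simp

theorem pvBlock_pos (P : List Int) (hne : P ≠ []) (hg : ∀ k ∈ P, k ∈ pvAllCodes) :
    pvBlock (P.map pvConvA) =
      (List.range 3).map (fun L =>
        (List.range (3 * P.length - 1)).map (fun col => pvDotB P P.length L col)) := by
  have hr : List.range 3 = [0, 1, 2] := by decide
  rw [hr]
  unfold pvBlock
  simp only [List.map_cons, List.map_nil]
  refine congrArg₂ _ ?_ (congrArg₂ _ ?_ (congrArg₂ _ ?_ rfl)) <;>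
  · rw [pvLine_pos P _ (by omega) hg hne]
    apply List.map_congr_left
    intro col _
    simp [pvDotB, pvBit]

-- ---- stage 5: the dots assembly, blocks vs positions ----

theorem pvRowFold_eq (row : List (List (List Int))) :
    ∀ (l0 l1 l2 : List Int), (∀ x ∈ row, pvOkCell x) →
      (l0 = [] ↔ l1 = []) → (l0 = [] ↔ l2 = []) →
      row.foldl pvStepDotCellA (l0, l1, l2) =
        (row.foldl (fun line cell => (if line ≠ [] then line ++ [0] else line) ++ cell.getD 0 []) l0,
         row.foldl (fun line cell => (if line ≠ [] then line ++ [0] else line) ++ cell.getD 1 []) l1,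
         row.foldl (fun line cell => (if line ≠ [] then line ++ [0] else line) ++ cell.getD 2 []) l2) := by
  induction row with
  | nil => intro l0 l1 l2 _ _ _; simp
  | cons c row ih =>
    intro l0 l1 l2 hok h01 h02
    have hc : pvOkCell c := hok c (List.mem_cons_self ..)
    have hrest : ∀ x ∈ row, pvOkCell x := fun x hx => hok x (List.mem_cons_of_mem c hx)
    simp only [List.foldl_cons]
    by_cases hl0 : l0 = []
    · have hl1 : l1 = [] := h01.mp hl0
      have hl2 : l2 = [] := h02.mp hl0
      subst hl0 hl1 hl2
      have hstep : pvStepDotCellA ([], [], []) c = (c.getD 0 [], c.getD 1 [], c.getD 2 []) := by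
        unfold pvStepDotCellA
        simp
      rw [hstep]
      have hih := ih (c.getD 0 []) (c.getD 1 []) (c.getD 2 []) hrest
        (iff_of_false hc.1 hc.2.1) (iff_of_false hc.1 hc.2.2)
      simpa using hih
    · have hl1 : l1 ≠ [] := fun h => hl0 (h01.mpr h)
      have hl2 : l2 ≠ [] := fun h => hl0 (h02.mpr h)
      have hstep : pvStepDotCellA (l0, l1, l2) c =
          (l0 ++ [0] ++ c.getD 0 [], l1 ++ [0] ++ c.getD 1 [], l2 ++ [0] ++ c.getD 2 []) := by
        unfold pvStepDotCellA
        simp [hl0]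
      rw [hstep]
      rw [if_pos hl0, if_pos hl1, if_pos hl2]
      exact ih _ _ _ hrest (by simp) (by simp)

theorem pvDotsFold_eq (rest : List (List (List (List Int)))) :
    ∀ (dots : List (List Int)), dots ≠ [] →
      List.foldl pvStepDotsA dots rest =
        dots ++ rest.flatMap (fun r =>
          List.replicate (dots.headD []).length 0 ::
            (let rd := r.foldl pvStepDotCellA ([], [], []); [rd.1, rd.2.1, rd.2.2])) := by
  induction rest with
  | nil => intro dots _; simp
  | cons r rest ih =>
    intro dots hne
    simp only [List.foldl_cons]
    have hstep : pvStepDotsA dots r =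
        dots ++ (List.replicate (dots.headD []).length 0 ::
          (let rd := r.foldl pvStepDotCellA ([], [], []); [rd.1, rd.2.1, rd.2.2])) := by
      unfold pvStepDotsA
      rw [if_pos hne]
      simp
    rw [hstep]
    rw [ih _ (by simp)]
    have hhead : ∀ (l : List (List Int)), (dots ++ l).headD [] = dots.headD [] := by
      intro l
      cases dots with
      | nil => exact absurd rfl hne
      | cons d ds => simp
    rw [hhead]
    simp [List.flatMap_cons, List.append_assoc]

theorem pvDots_blocks (r0 : List (List (List Int))) (rest : List (List (List (List Int))))
    (hok : ∀ r ∈ r0 :: rest, ∀ x ∈ r, pvOkCell x) :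
    List.foldl pvStepDotsA [] (r0 :: rest) =
      pvBlock r0 ++ rest.flatMap
        (fun r => List.replicate (pvLine r0 0).length 0 :: pvBlock r) := by
  have hblock : ∀ row, (∀ x ∈ row, pvOkCell x) →
      row.foldl pvStepDotCellA ([], [], []) = (pvLine row 0, pvLine row 1, pvLine row 2) := by
    intro row h
    exact pvRowFold_eq row [] [] [] h Iff.rfl Iff.rfl
  simp only [List.foldl_cons]
  have hstep0 : pvStepDotsA [] r0 = pvBlock r0 := by
    unfold pvStepDotsA
    rw [if_neg (by simp)]
    rw [hblock r0 (hok r0 (by simp))]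
    simp [pvBlock]
  rw [hstep0, pvDotsFold_eq rest _ (by simp [pvBlock])]
  have hhd : (pvBlock r0).headD [] = pvLine r0 0 := by simp [pvBlock]
  rw [hhd]
  congr 1
  apply List.flatMap_congr
  intro r hr
  rw [hblock r (hok r (by simp [hr]))]
  simp [pvBlock]

theorem pvDotB_shift (P : List Int) (L col : Nat) :
    pvDotB P 10 (4 + L) col = pvDotB (P.drop 10) 10 L col := by
  unfold pvDotB
  have hm : (4 + L) % 4 = L % 4 := Nat.add_mod_left 4 L
  have hd : (4 + L) / 4 = L / 4 + 1 := by omega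
  rw [hm, hd]
  have hidx : (L / 4 + 1) * 10 + col / 3 = 10 + (L / 4 * 10 + col / 3) := by ring
  rw [hidx]
  have hg : P.getD (10 + (L / 4 * 10 + col / 3)) 0 = (P.drop 10).getD (L / 4 * 10 + col / 3) 0 := by
    simp [List.getD_eq_getElem?_getD, List.getElem?_drop]
  rw [hg]

theorem pvAssemble : ∀ m : Nat, 1 ≤ m → ∀ P : List Int, P.length = 10 * m →
    (∀ k ∈ P, k ∈ pvAllCodes) →
    pvBlock ((P.take 10).map pvConvA) ++
      (pvChunk (P.drop 10)).flatMap
        (fun q => List.replicate 29 (0 : Int) :: pvBlock (q.map pvConvA))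
    = (List.range (4 * m - 1)).map (fun L => (List.range 29).map (fun col => pvDotB P 10 L col)) := by
  intro m
  induction m with
  | zero => omega
  | succ m ih =>
    intro _ P hlen hg
    have htlen : (P.take 10).length = 10 := by simp [List.length_take]; omega
    have htg : ∀ k ∈ P.take 10, k ∈ pvAllCodes := fun k hk => hg k (List.mem_of_mem_take hk)
    have hblockT : pvBlock ((P.take 10).map pvConvA) =
        (List.range 3).map (fun L => (List.range 29).map (fun col => pvDotB P 10 L col)) := by
      rw [pvBlock_pos (P.take 10) (by intro h0; rw [h0] at htlen; simp at htlen) htg, htlen]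
      have h29 : 3 * 10 - 1 = 29 := by norm_num
      rw [h29]
      have hr3 : List.range 3 = [0, 1, 2] := by decide
      rw [hr3]
      simp only [List.map_cons, List.map_nil]
      refine congrArg₂ _ ?_ (congrArg₂ _ ?_ (congrArg₂ _ ?_ rfl)) <;>
      · apply List.map_congr_left
        intro col hcol
        rw [List.mem_range] at hcol
        simp only [pvDotB]
        norm_num
        congr 1
        have hc3 : col / 3 < 10 := by omega
        simp [List.getD_eq_getElem?_getD, List.getElem?_take, hc3]
    by_cases hm : m = 0
    · subst hm
      have hdrop : P.drop 10 = [] := List.drop_eq_nil_of_le (by omega)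
      have hcnil : pvChunk ([] : List Int) = [] := by rw [pvChunk]; simp
      rw [hdrop, hcnil]
      simp only [List.flatMap_nil, List.append_nil]
      rw [hblockT]
    · have hm1 : 1 ≤ m := by omega
      have hdlen : (P.drop 10).length = 10 * m := by simp [List.length_drop]; omega
      have hdne : P.drop 10 ≠ [] := by
        intro h0
        rw [h0] at hdlen
        simp at hdlen
        omega
      have hdg : ∀ k ∈ P.drop 10, k ∈ pvAllCodes := fun k hk => hg k (List.mem_of_mem_drop hk)
      rw [pvChunk, if_neg hdne]
      rw [List.flatMap_cons]
      have hIH := ih hm1 (P.drop 10) hdlen hdg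
      have hrange : 4 * (m + 1) - 1 = 4 + (4 * m - 1) := by omega
      rw [hrange, List.range_add, List.map_append, List.map_map]
      have hfirst4 : (List.range 4).map (fun L => (List.range 29).map (fun col => pvDotB P 10 L col))
          = pvBlock ((P.take 10).map pvConvA) ++ [List.replicate 29 (0 : Int)] := by
        have hr4 : List.range 4 = [0, 1, 2, 3] := by decide
        rw [hr4, hblockT]
        have hr3 : List.range 3 = [0, 1, 2] := by decide
        rw [hr3]
        have hz : (List.range 29).map (fun col => pvDotB P 10 3 col) = List.replicate 29 (0 : Int) := by
          have h3 : ∀ col, pvDotB P 10 3 col = 0 := by intro col; simp [pvDotB]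
          simp only [h3, List.map_const']
          simp
        simp only [List.map_cons, List.map_nil, hz, List.cons_append, List.nil_append]
      rw [hfirst4]
      have htail : (List.range (4 * m - 1)).map
          ((fun L => (List.range 29).map (fun col => pvDotB P 10 L col)) ∘ (4 + ·))
          = (List.range (4 * m - 1)).map
            (fun L => (List.range 29).map (fun col => pvDotB (P.drop 10) 10 L col)) := by
        apply List.map_congr_left
        intro L _
        simp only [Function.comp_apply]
        apply List.map_congr_left
        intro col _
        exact pvDotB_shift P L col
      rw [htail, ← hIH]
      simp [pvBlock, List.append_assoc]

-- ---- top level ----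

theorem pv_main (text : String) : to_braille text = to_braille_alt text := by
  have hR : to_braille_alt text =
      (List.range (4 * (if (text.toList.flatMap pvCodesOf).length < 10 then 1
          else ((text.toList.flatMap pvCodesOf).length + 9) / 10) - 1)).map (fun line =>
        (List.range (if (if (text.toList.flatMap pvCodesOf).length < 10
              then (text.toList.flatMap pvCodesOf).length else 10) = 0 then 0
            else 3 * (if (text.toList.flatMap pvCodesOf).length < 10
              then (text.toList.flatMap pvCodesOf).length else 10) - 1)).map
          (fun col => pvDotB
            (if (text.toList.flatMap pvCodesOf).length < 10 then text.toList.flatMap pvCodesOf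
              else text.toList.flatMap pvCodesOf ++
                List.replicate ((if (text.toList.flatMap pvCodesOf).length < 10 then 1
                  else ((text.toList.flatMap pvCodesOf).length + 9) / 10) * 10 -
                    (text.toList.flatMap pvCodesOf).length) (0 : Int))
            (if (text.toList.flatMap pvCodesOf).length < 10
              then (text.toList.flatMap pvCodesOf).length else 10) line col)) := rfl
  have hg0 : ∀ k ∈ text.toList.flatMap pvCodesOf, k ∈ pvAllCodes := by
    intro k hk
    rcases List.mem_flatMap.mp hk with ⟨c, _, hc⟩
    exact pvCodesOf_good c k hc
  rw [show to_braille text =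
      (pvFixRowsA ((text.toList.foldl pvStepCellA []).foldl pvStepRowA [[]])).foldl pvStepDotsA []
      from rfl]
  rw [hR, pvCells_eq, pvRows_eq]
  revert hg0
  generalize text.toList.flatMap pvCodesOf = P0
  intro hg0
  by_cases hz : P0.length = 0
  · have hnil : P0 = [] := List.length_eq_zero_iff.mp hz
    subst hnil
    simp only [List.map_nil, List.length_nil]
    rw [pvRowsB_nil]
    rw [pvDots_blocks [] [] (by simp)]
    norm_num
    simp [pvBlock, pvLine]
  · by_cases hsm : P0.length < 10
    · have hne : P0 ≠ [] := fun h0 => hz (by rw [h0]; simp)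
      rw [pvRows_small P0 hne hsm]
      rw [pvDots_blocks _ [] (by
        intro r hr x hx
        simp only [List.mem_cons, List.not_mem_nil, or_false] at hr
        subst hr
        rcases List.mem_map.mp hx with ⟨k, _, rfl⟩
        exact pvOk_conv k)]
      simp only [List.flatMap_nil, List.append_nil, if_pos hsm, if_neg hz]
      have h41 : 4 * 1 - 1 = 3 := by norm_num
      rw [h41]
      rw [pvBlock_pos P0 hne hg0]
    · have hnot : ¬ P0.length < 10 := hsm
      simp only [if_neg hnot]
      rw [pvRows_codes P0 (by omega)]
      set m := (P0.length + 9) / 10 with hm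
      set P := P0 ++ List.replicate ((P0.length + 9) / 10 * 10 - P0.length) (0 : Int) with hP
      have hm1 : 1 ≤ m := by rw [hm]; omega
      have hPlen : P.length = 10 * m := by
        rw [hP]
        simp only [List.length_append, List.length_replicate]
        omega
      have hPg : ∀ k ∈ P, k ∈ pvAllCodes := by
        intro k hk
        rcases List.mem_append.mp hk with h | h
        · exact hg0 k h
        · rw [List.eq_of_mem_replicate h]; decide
      have hPne : P ≠ [] := by
        intro h0
        have := congrArg List.length h0
        rw [hPlen] at this
        simp at this
        omega
      rw [show pvChunk P = P.take 10 :: pvChunk (P.drop 10) from by rw [pvChunk, if_neg hPne]]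
      rw [List.map_cons]
      rw [pvDots_blocks _ _ (by
        intro r hr x hx
        rcases List.mem_cons.mp hr with rfl | hr
        · rcases List.mem_map.mp hx with ⟨k, _, rfl⟩
          exact pvOk_conv k
        · rcases List.mem_map.mp hr with ⟨q, _, rfl⟩
          rcases List.mem_map.mp hx with ⟨k, _, rfl⟩
          exact pvOk_conv k)]
      have ht10 : (P.take 10).length = 10 := by simp [List.length_take]; omega
      have hlinelen : (pvLine ((P.take 10).map pvConvA) 0).length = 29 := by
        rw [pvLine_len (P.take 10) (fun k hk => hPg k (List.mem_of_mem_take hk))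
          (by intro h0; rw [h0] at ht10; simp at ht10), ht10]
      rw [hlinelen, List.flatMap_map]
      have h29 : (if (10 : Nat) = 0 then 0 else 3 * 10 - 1) = 29 := by norm_num
      rw [h29, pvAssemble m hm1 P hPlen hPg]

-- ===== VERDICT (by name: the statement is the Claim_ definition above) =====
theorem to_braille_spec : Claim_equal_to_braille := by
  intro text _ _
  unfold Spec_to_braille
  exact pv_main text
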